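-- pv_equiv track=rewrite | github.com/honggoonin/SoftMark | extractor/recognitionEngine.py | callfindChain
-- ===== SOURCE A (Python) =====
-- def callfindChain(allBBLs, BBLsNum):
--
--     if not allBBLs:
--         return 0
--
--     # BBL = (bbi, (start, end))
--     BBL = allBBLs[0]
--     listBBL = list()
--     listBBL.append(BBL)
--
--     diff_allBBLs = [diffBBLs for diffBBLs in allBBLs if diffBBLs[0] != BBL[0]]
--     result = findChain_right(listBBL, diff_allBBLs)
--
--     if len(result) == BBLsNum:
--         FuncOff = result[0][1][0]
--         return FuncOff
--
--     else:
--         new_allBBLs = allBBLs[1:]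
--         return callfindChain(new_allBBLs, BBLsNum)
--
-- def findChain_right(BBL, allBBLs):
--     nextBBLs = [bbl for bbl in allBBLs if bbl[1][0] == BBL[0][1][1]]
--
--     if not nextBBLs:
--         return BBL
--
--     elif len(nextBBLs) > 1:
--         doneList = list()
--         candidates = list()
--
--         for nextBBL in nextBBLs:
--             if nextBBL[1][1] not in doneList:
--                 listnextBBL = list()
--                 listnextBBL.append(nextBBL)
--                 diff_allBBLs = [diffBBLs for diffBBLs in allBBLs if diffBBLs[0] != nextBBL[0]]
--                 candidates.append(BBL + findChain_right(listnextBBL, diff_allBBLs))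
--                 doneList.append(nextBBL[1][1])
--         candidates_len = [len(candidate) for candidate in candidates]
--         return candidates[candidates_len.index(max(candidates_len))]
--
--     else:
--         diff_allBBLs = [diffBBLs for diffBBLs in allBBLs if diffBBLs[0] != nextBBLs[0][0]]
--         return BBL + findChain_right(nextBBLs, diff_allBBLs)
-- ===== SOURCE B (Python) =====
-- # B: computes only the chain LENGTH (no list building, no argmax over candidate lists),
-- # and drives the scan over starting blocks with an explicit loop instead of tail recursion.
--
-- def _chain_len(b, pool):
--     # length of the longest chain starting at block b, drawing successors from pool,
--     # exploring at most one successor per distinct end address (first occurrence wins,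
--     # as in the original filtering), removing the chosen block's index from the pool.
--     best = 0
--     seen = set()
--     for n in pool:
--         if n[1][0] == b[1][1] and n[1][1] not in seen:
--             seen.add(n[1][1])
--             l = _chain_len(n, [x for x in pool if x[0] != n[0]])
--             if l > best:
--                 best = l
--     return 1 + best
--
-- def callfindChain(allBBLs, BBLsNum):
--     suffix = allBBLs
--     while suffix:
--         b = suffix[0]
--         if _chain_len(b, [x for x in suffix if x[0] != b[0]]) == BBLsNum:
--             return b[1][0]
--         suffix = suffix[1:]
--     return 0
-- ===== Notes on version B (the rewrite author's own statement) =====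
-- stated objective: simpler
-- what changed: B replaces the recursive driver and the chain-building helper (which materialises every candidate chain and picks the longest by an index-of-max scan) with an explicit loop over starting blocks and a helper that computes only the chain LENGTH via a running max over deduplicated successors; the returned offset is read directly off the starting block.
import Mathlib
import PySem

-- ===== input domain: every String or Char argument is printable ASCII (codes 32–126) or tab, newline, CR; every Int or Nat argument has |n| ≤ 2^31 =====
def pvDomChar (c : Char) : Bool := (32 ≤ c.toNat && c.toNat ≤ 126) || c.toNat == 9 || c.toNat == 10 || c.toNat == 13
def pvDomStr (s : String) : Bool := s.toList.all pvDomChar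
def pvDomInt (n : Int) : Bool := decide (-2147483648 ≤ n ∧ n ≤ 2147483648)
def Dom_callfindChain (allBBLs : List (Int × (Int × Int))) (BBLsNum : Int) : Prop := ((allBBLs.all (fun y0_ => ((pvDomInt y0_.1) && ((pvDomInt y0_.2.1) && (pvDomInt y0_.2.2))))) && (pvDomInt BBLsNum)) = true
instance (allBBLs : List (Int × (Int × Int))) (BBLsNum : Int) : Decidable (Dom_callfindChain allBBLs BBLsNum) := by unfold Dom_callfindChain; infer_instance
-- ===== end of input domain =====

-- B computes only the chain length (no candidate chain lists, no index-of-max scan)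
-- and drives the scan over starting blocks with an explicit loop; same return value.

-- termination helper for both ports (cited by their decreasing_by proofs)
lemma pv_unattach_mem {α : Type} {pool : List α} {s : List {x // x ∈ pool}} {a : α}
    (h : a ∈ s.unattach) : a ∈ pool := by
  obtain ⟨hp, -⟩ := List.mem_unattach.mp h
  exact hp

-- ===== PORT A =====
-- helper of A (transliteration).  BBL is nonempty at every call site, so `headD (0,(0,0))`
-- is only a totality guard for Python's `BBL[0]`, and the `none` arm of the match on
-- index? is unreachable (candidates is nonempty whenever that branch runs).
def findChain_right (BBL : List (Int × (Int × Int))) (pool : List (Int × (Int × Int))) :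
    List (Int × (Int × Int)) :=
  let nexts := pool.filter (fun x => x.2.1 == (BBL.headD (0, (0, 0))).2.2)
  match hm : nexts with
  | [] => BBL
  | n :: _ =>
    if 1 < nexts.length then
      -- the doneList / candidates loop
      let st := nexts.attach.foldl
        (fun (st : List Int × List (List (Int × (Int × Int)))) nb =>
          if st.1.contains nb.1.2.2 then st
          else (st.1 ++ [nb.1.2.2],
                st.2 ++ [BBL ++ findChain_right [nb.1] (pool.filter (fun x => x.1 != nb.1.1))]))
        ([], [])
      let lens := st.2.map (fun c => (c.length : Int))
      match PySem.List.index? lens ((PySem.List.max? lens (fun x => x)).getD 0) with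
      | some i => st.2.getD i BBL
      | none => BBL
    else
      BBL ++ findChain_right nexts (pool.filter (fun x => x.1 != n.1))
termination_by pool.length
decreasing_by
  · have hp : nb.1 ∈ pool := pv_unattach_mem nb.2
    have h : (pool.attach.filter (fun (x : {y // y ∈ pool}) => x.1.1 != nb.1.1)).length
        < pool.attach.length :=
      List.length_filter_lt_length_iff_exists.mpr ⟨⟨nb.1, hp⟩, List.mem_attach _ _, by simp⟩
    simpa using h
  · have h2 : n ∈ nexts := by rw [hm]; simp
    have hp : n ∈ pool := pv_unattach_mem h2
    have h : (pool.attach.filter (fun (x : {y // y ∈ pool}) => x.1.1 != n.1)).length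
        < pool.attach.length :=
      List.length_filter_lt_length_iff_exists.mpr ⟨⟨n, hp⟩, List.mem_attach _ _, by simp⟩
    simpa using h

def callfindChain (allBBLs : List (Int × (Int × Int))) (BBLsNum : Int) : Int :=
  match allBBLs with
  | [] => 0
  | BBL :: rest =>
    let diff_allBBLs := (BBL :: rest).filter (fun x => x.1 != BBL.1)
    let result := findChain_right [BBL] diff_allBBLs
    if ((result.length : Int) == BBLsNum) then (result.headD (0, (0, 0))).2.1
    else callfindChain rest BBLsNum

-- ===== PORT B =====
-- helper of B: length of the longest chain starting at b (first-occurrence dedup of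
-- successor end addresses; exactly Source B's loop with `best` and the set `seen`).
def chainLen (b : Int × (Int × Int)) (pool : List (Int × (Int × Int))) : Int :=
  let st := pool.attach.foldl
    (fun (st : Int × PySem.Set Int) n =>
      if (n.1.2.1 == b.2.2) && !(PySem.Set.contains st.2 n.1.2.2) then
        let l := chainLen n.1 (pool.filter (fun x => x.1 != n.1.1))
        ((if l > st.1 then l else st.1), PySem.Set.add st.2 n.1.2.2)
      else st)
    (0, PySem.Set.empty)
  1 + st.1
termination_by pool.length
decreasing_by
  have h : (pool.attach.filter (fun (x : {y // y ∈ pool}) => x.1.1 != n.1.1)).length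
      < pool.attach.length :=
    List.length_filter_lt_length_iff_exists.mpr ⟨n, List.mem_attach _ _, by simp⟩
  simpa using h

def callfindChain_alt (allBBLs : List (Int × (Int × Int))) (BBLsNum : Int) : Int :=
  match allBBLs with
  | [] => 0
  | b :: rest =>
    if (chainLen b ((b :: rest).filter (fun x => x.1 != b.1)) == BBLsNum) then b.2.1
    else callfindChain_alt rest BBLsNum

-- ===== PRECONDITION & SPEC =====
def Spec_callfindChain (allBBLs : List (Int × (Int × Int))) (BBLsNum : Int) (out : Int) : Prop := out = callfindChain_alt allBBLs BBLsNum
instance (allBBLs : List (Int × (Int × Int))) (BBLsNum : Int) (out : Int) : Decidable (Spec_callfindChain allBBLs BBLsNum out) := by unfold Spec_callfindChain; infer_instance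

-- ===== CLAIM (what is proved, stated in full; the proofs are below) =====
def Claim_equal_callfindChain : Prop := ∀ (allBBLs : List (Int × (Int × Int))) (BBLsNum : Int), Dom_callfindChain allBBLs BBLsNum → Spec_callfindChain allBBLs BBLsNum (callfindChain allBBLs BBLsNum)

-- ===== LEMMAS AND PROOFS =====

-- foldl over an attached list, with the step function explicit
lemma pv_foldl_attach {α β : Type} (l : List α) (f : β → α → β) (init : β) :
    l.attach.foldl (fun acc x => f acc x.1) init = l.foldl f init := by
  rw [List.foldl_attach]

-- A's loop body over the successor list (attach removed, start chain a singleton [b])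
def stepA (b : Int × (Int × Int)) (pool : List (Int × (Int × Int)))
    (st : List Int × List (List (Int × (Int × Int)))) (n : Int × (Int × Int)) :
    List Int × List (List (Int × (Int × Int))) :=
  if st.1.contains n.2.2 then st
  else (st.1 ++ [n.2.2],
        st.2 ++ [b :: findChain_right [n] (pool.filter (fun x => x.1 != n.1))])

-- B's loop body over the successor list (set ops unfolded)
def stepB (pool : List (Int × (Int × Int))) (st : Int × List Int) (n : Int × (Int × Int)) :
    Int × List Int :=
  if st.2.contains n.2.2 then st
  else ((if chainLen n (pool.filter (fun x => x.1 != n.1)) > st.1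
         then chainLen n (pool.filter (fun x => x.1 != n.1)) else st.1),
        st.2 ++ [n.2.2])

-- A's final selection: first candidate of maximal length
def selectMax (b : Int × (Int × Int)) (cands : List (List (Int × (Int × Int)))) :
    List (Int × (Int × Int)) :=
  let lens := cands.map (fun c => (c.length : Int))
  match PySem.List.index? lens ((PySem.List.max? lens (fun x => x)).getD 0) with
  | some i => cands.getD i [b]
  | none => [b]

lemma chainLen_eq (b : Int × (Int × Int)) (pool : List (Int × (Int × Int))) :
    chainLen b pool
      = 1 + ((pool.filter (fun x => x.2.1 == b.2.2)).foldl (stepB pool) (0, [])).1 := by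
  calc chainLen b pool
      = 1 + (pool.attach.foldl
          (fun (st : Int × PySem.Set Int) (n : {x // x ∈ pool}) =>
            if (n.1.2.1 == b.2.2) && !(PySem.Set.contains st.2 n.1.2.2) then
              ((if chainLen n.1 (pool.filter (fun x => x.1 != n.1.1)) > st.1
                then chainLen n.1 (pool.filter (fun x => x.1 != n.1.1)) else st.1),
               PySem.Set.add st.2 n.1.2.2)
            else st)
          (0, PySem.Set.empty)).1 := by rw [chainLen.eq_1]
    _ = 1 + ((pool.foldl
          (fun (st : Int × List Int) (n : Int × (Int × Int)) =>
            if (n.2.1 == b.2.2) && !(PySem.Set.contains st.2 n.2.2) then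
              ((if chainLen n (pool.filter (fun x => x.1 != n.1)) > st.1
                then chainLen n (pool.filter (fun x => x.1 != n.1)) else st.1),
               PySem.Set.add st.2 n.2.2)
            else st)
          (0, [])).1) := by
        exact congrArg (fun z : Int × List Int => 1 + z.1)
          (pv_foldl_attach pool
            (fun (st : Int × List Int) (n : Int × (Int × Int)) =>
              if (n.2.1 == b.2.2) && !(PySem.Set.contains st.2 n.2.2) then
                ((if chainLen n (pool.filter (fun x => x.1 != n.1)) > st.1
                  then chainLen n (pool.filter (fun x => x.1 != n.1)) else st.1),
                 PySem.Set.add st.2 n.2.2)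
              else st)
            (0, PySem.Set.empty))
    _ = 1 + ((pool.foldl
          (fun (st : Int × List Int) (n : Int × (Int × Int)) =>
            if (n.2.1 == b.2.2) then stepB pool st n else st)
          (0, [])).1) := by
        have hf : (fun (st : Int × List Int) (n : Int × (Int × Int)) =>
            if (n.2.1 == b.2.2) && !(PySem.Set.contains st.2 n.2.2) then
              ((if chainLen n (pool.filter (fun x => x.1 != n.1)) > st.1
                then chainLen n (pool.filter (fun x => x.1 != n.1)) else st.1),
               PySem.Set.add st.2 n.2.2)
            else st)
          = (fun (st : Int × List Int) (n : Int × (Int × Int)) =>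
            if (n.2.1 == b.2.2) then stepB pool st n else st) := by
          funext st n
          by_cases h1 : n.2.1 == b.2.2 <;>
            simp [stepB, h1, PySem.Set.add, PySem.Set.contains] <;>
            split_ifs with hmem <;> simp [hmem]
        rw [hf]
    _ = 1 + ((pool.filter (fun x => x.2.1 == b.2.2)).foldl (stepB pool) (0, [])).1 := by
        rw [PySem.List.foldl_if_eq_foldl_filter]

lemma fcr_empty (b : Int × (Int × Int)) (pool : List (Int × (Int × Int)))
    (h : pool.filter (fun x => x.2.1 == b.2.2) = []) :
    findChain_right [b] pool = [b] := by
  rw [findChain_right]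
  simp only [List.headD_cons]
  split
  · rfl
  · rename_i n tail heq
    rw [h] at heq
    simp at heq

lemma fcr_one (b n0 : Int × (Int × Int)) (pool : List (Int × (Int × Int)))
    (h : pool.filter (fun x => x.2.1 == b.2.2) = [n0]) :
    findChain_right [b] pool
      = b :: findChain_right [n0] (pool.filter (fun x => x.1 != n0.1)) := by
  rw [findChain_right]
  simp only [List.headD_cons]
  split
  · rename_i heq
    rw [h] at heq
    simp at heq
  · rename_i n tail heq
    rw [h] at heq
    injection heq with hn ht
    subst hn
    rw [h]
    simp

lemma fcr_many (b n0 n1 : Int × (Int × Int)) (ns : List (Int × (Int × Int)))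
    (pool : List (Int × (Int × Int)))
    (h : pool.filter (fun x => x.2.1 == b.2.2) = n0 :: n1 :: ns) :
    findChain_right [b] pool
      = selectMax b (((n0 :: n1 :: ns).foldl (stepA b pool) ([], [])).2) := by
  rw [findChain_right]
  simp only [List.headD_cons]
  split
  · rename_i heq
    rw [h] at heq
    simp at heq
  · rename_i n tail heq
    rw [h]
    rw [if_pos (by simp only [List.length_cons]; omega : 1 < (n0 :: n1 :: ns).length)]
    simp only [List.singleton_append]
    rw [pv_foldl_attach (n0 :: n1 :: ns)
      (fun (st : List Int × List (List (Int × (Int × Int)))) (n : Int × (Int × Int)) =>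
        if st.1.contains n.2.2 then st
        else (st.1 ++ [n.2.2],
              st.2 ++ [b :: findChain_right [n] (pool.filter (fun x => x.1 != n.1))]))
      ([], [])]
    rfl

lemma selectMax_spec (b : Int × (Int × Int)) (cands : List (List (Int × (Int × Int)))) (M : Int)
    (hub : ∀ cd ∈ cands, (cd.length : Int) ≤ M)
    (hex : ∃ cd ∈ cands, (cd.length : Int) = M)
    (hhd : ∀ cd ∈ cands, ∃ t, cd = b :: t) :
    ∃ t, selectMax b cands = b :: t ∧ (1 + (t.length : Int)) = M := by
  obtain ⟨cd0, hcd0, hlcd0⟩ := hex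
  have hcne : cands ≠ [] := by
    intro hE
    rw [hE] at hcd0
    simp at hcd0
  have hlne : cands.map (fun c => (c.length : Int)) ≠ [] := by simpa using hcne
  obtain ⟨m, hm⟩ : ∃ m, PySem.List.max? (cands.map (fun c => (c.length : Int))) (fun x => x) = some m := by
    rcases hmm : PySem.List.max? (cands.map (fun c => (c.length : Int))) (fun x => x) with _ | m
    · rw [PySem.List.max?_eq_none_iff] at hmm
      exact absurd hmm hlne
    · exact ⟨m, hmm⟩
  have hmmem : m ∈ cands.map (fun c => (c.length : Int)) := PySem.List.max?_mem hm
  have hmmax := PySem.List.max?_isMax hm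
  have hmM : m = M := by
    have h1 : M ≤ m := hmmax _ (List.mem_map.mpr ⟨cd0, hcd0, hlcd0⟩)
    obtain ⟨cdm, hcdm, hcdml⟩ := List.mem_map.mp hmmem
    have h2 := hub cdm hcdm
    omega
  obtain ⟨i, hi⟩ : ∃ i, PySem.List.index? (cands.map (fun c => (c.length : Int))) m = some i := by
    rcases hii : PySem.List.index? (cands.map (fun c => (c.length : Int))) m with _ | i
    · rw [PySem.List.index?_eq_none_iff] at hii
      exact absurd hmmem hii
    · exact ⟨i, hii⟩
  obtain ⟨hk, hik, -⟩ := PySem.List.getElem_of_index?_eq_some hi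
  have hklt : i < cands.length := by simpa using hk
  obtain ⟨tc, htc⟩ := hhd (cands[i]) (List.getElem_mem hklt)
  have hsel : selectMax b cands = cands[i] := by
    simp only [selectMax]
    rw [hm]
    simp only [Option.getD_some]
    rw [hi]
    exact List.getD_eq_getElem cands [b] hklt
  have hlen : (cands[i].length : Int) = m := by
    have h2 : (cands.map (fun c => (c.length : Int)))[i] = ((cands[i]).length : Int) := by simp
    rw [h2] at hik
    exact hik
  refine ⟨tc, by rw [hsel, htc], ?_⟩
  rw [htc] at hlen
  push_cast [List.length_cons] at hlen
  omega

-- the two loops over the successor list run in lockstep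
lemma foldInv (b : Int × (Int × Int)) (pool : List (Int × (Int × Int))) :
    ∀ (ns : List (Int × (Int × Int))),
    (∀ n ∈ ns, ∃ t, findChain_right [n] (pool.filter (fun x => x.1 != n.1)) = n :: t ∧
        chainLen n (pool.filter (fun x => x.1 != n.1)) = 1 + (t.length : Int)) →
    ∀ (done : List Int) (cands : List (List (Int × (Int × Int)))) (best : Int),
      0 ≤ best →
      (∀ cd ∈ cands, ∃ t, cd = b :: t) →
      (∀ cd ∈ cands, (cd.length : Int) ≤ 1 + best) →
      (best = 0 ∨ ∃ cd ∈ cands, (cd.length : Int) = 1 + best) →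
      ((ns.foldl (stepA b pool) (done, cands)).1 = (ns.foldl (stepB pool) (best, done)).2)
      ∧ (∃ suf, (ns.foldl (stepA b pool) (done, cands)).2 = cands ++ suf)
      ∧ 0 ≤ (ns.foldl (stepB pool) (best, done)).1
      ∧ (∀ cd ∈ (ns.foldl (stepA b pool) (done, cands)).2, ∃ t, cd = b :: t)
      ∧ (∀ cd ∈ (ns.foldl (stepA b pool) (done, cands)).2,
          (cd.length : Int) ≤ 1 + (ns.foldl (stepB pool) (best, done)).1)
      ∧ ((ns.foldl (stepB pool) (best, done)).1 = 0
         ∨ ∃ cd ∈ (ns.foldl (stepA b pool) (done, cands)).2,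
            (cd.length : Int) = 1 + (ns.foldl (stepB pool) (best, done)).1) := by
  intro ns
  induction ns with
  | nil =>
    intro _ done cands best h0 hhd hle hex
    exact ⟨rfl, ⟨[], by simp⟩, h0, hhd, hle, hex⟩
  | cons n ns ih =>
    intro hrc done cands best h0 hhd hle hex
    obtain ⟨t, hrn, hcn⟩ := hrc n (by simp)
    have hrc' : ∀ m ∈ ns, ∃ t, findChain_right [m] (pool.filter (fun x => x.1 != m.1)) = m :: t ∧
        chainLen m (pool.filter (fun x => x.1 != m.1)) = 1 + (t.length : Int) :=
      fun m hm => hrc m (by simp [hm])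
    have hcpos : 1 ≤ chainLen n (pool.filter (fun x => x.1 != n.1)) := by
      have hnn := Int.natCast_nonneg t.length
      omega
    have hlnew : ((b :: findChain_right [n] (pool.filter (fun x => x.1 != n.1))).length : Int)
        = 1 + chainLen n (pool.filter (fun x => x.1 != n.1)) := by
      rw [hrn, hcn]
      push_cast [List.length_cons]
      ring
    simp only [List.foldl_cons]
    by_cases hc : n.2.2 ∈ done
    · have eA : stepA b pool (done, cands) n = (done, cands) := by simp [stepA, hc]
      have eB : stepB pool (best, done) n = (best, done) := by simp [stepB, hc]
      rw [eA, eB]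
      exact ih hrc' done cands best h0 hhd hle hex
    · have eA : stepA b pool (done, cands) n
          = (done ++ [n.2.2],
             cands ++ [b :: findChain_right [n] (pool.filter (fun x => x.1 != n.1))]) := by
        simp [stepA, hc]
      have eB : stepB pool (best, done) n
          = ((if chainLen n (pool.filter (fun x => x.1 != n.1)) > best
              then chainLen n (pool.filter (fun x => x.1 != n.1)) else best),
             done ++ [n.2.2]) := by
        simp [stepB, hc]
      rw [eA, eB]
      by_cases hgt : chainLen n (pool.filter (fun x => x.1 != n.1)) > best
      · rw [if_pos hgt]
        obtain ⟨g1, ⟨suf, g2⟩, g3, g4, g5, g6⟩ := ih hrc' (done ++ [n.2.2])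
          (cands ++ [b :: findChain_right [n] (pool.filter (fun x => x.1 != n.1))])
          (chainLen n (pool.filter (fun x => x.1 != n.1)))
          (by omega)
          (by intro cd hcd
              rcases List.mem_append.mp hcd with hmem | hmem
              · exact hhd cd hmem
              · exact ⟨_, by simpa using hmem⟩)
          (by intro cd hcd
              rcases List.mem_append.mp hcd with hmem | hmem
              · have := hle cd hmem
                omega
              · have hcdeq : cd = b :: findChain_right [n] (pool.filter (fun x => x.1 != n.1)) := by
                  simpa using hmem
                rw [hcdeq, hlnew])
          (Or.inr ⟨b :: findChain_right [n] (pool.filter (fun x => x.1 != n.1)), by simp, hlnew⟩)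
        exact ⟨g1, ⟨(b :: findChain_right [n] (pool.filter (fun x => x.1 != n.1))) :: suf,
          by rw [g2]; simp⟩, g3, g4, g5, g6⟩
      · rw [if_neg hgt]
        have hcle : chainLen n (pool.filter (fun x => x.1 != n.1)) ≤ best := not_lt.mp hgt
        have hbpos : 1 ≤ best := le_trans hcpos hcle
        obtain ⟨cd0, hcd0, hlcd0⟩ : ∃ cd ∈ cands, (cd.length : Int) = 1 + best := by
          rcases hex with hx | hx
          · omega
          · exact hx
        obtain ⟨g1, ⟨suf, g2⟩, g3, g4, g5, g6⟩ := ih hrc' (done ++ [n.2.2])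
          (cands ++ [b :: findChain_right [n] (pool.filter (fun x => x.1 != n.1))])
          best h0
          (by intro cd hcd
              rcases List.mem_append.mp hcd with hmem | hmem
              · exact hhd cd hmem
              · exact ⟨_, by simpa using hmem⟩)
          (by intro cd hcd
              rcases List.mem_append.mp hcd with hmem | hmem
              · exact hle cd hmem
              · have hcdeq : cd = b :: findChain_right [n] (pool.filter (fun x => x.1 != n.1)) := by
                  simpa using hmem
                rw [hcdeq, hlnew]
                omega)
          (Or.inr ⟨cd0, List.mem_append_left _ hcd0, hlcd0⟩)
        exact ⟨g1, ⟨(b :: findChain_right [n] (pool.filter (fun x => x.1 != n.1))) :: suf,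
          by rw [g2]; simp⟩, g3, g4, g5, g6⟩

-- main correspondence: from a singleton start, findChain_right returns b :: t
-- and chainLen computes exactly its length.
lemma main_len : ∀ (N : Nat) (pool : List (Int × (Int × Int))), pool.length ≤ N →
    ∀ b : Int × (Int × Int), ∃ t, findChain_right [b] pool = b :: t ∧
      chainLen b pool = 1 + (t.length : Int) := by
  intro N
  induction N with
  | zero =>
    intro pool hlen b
    have hp : pool = [] := List.eq_nil_of_length_eq_zero (Nat.le_zero.mp hlen)
    subst hp
    refine ⟨[], fcr_empty b [] rfl, ?_⟩
    rw [chainLen_eq]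
    simp
  | succ N ih =>
    intro pool hlen b
    have hrc : ∀ n ∈ pool.filter (fun x => x.2.1 == b.2.2),
        ∃ t, findChain_right [n] (pool.filter (fun x => x.1 != n.1)) = n :: t ∧
          chainLen n (pool.filter (fun x => x.1 != n.1)) = 1 + (t.length : Int) := by
      intro n hn
      have hlt : (pool.filter (fun x => x.1 != n.1)).length < pool.length :=
        List.length_filter_lt_length_iff_exists.mpr ⟨n, (List.mem_filter.mp hn).1, by simp⟩
      exact ih _ (by omega) n
    rcases hne : pool.filter (fun x => x.2.1 == b.2.2) with _ | ⟨n0, ns⟩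
    · refine ⟨[], fcr_empty b pool hne, ?_⟩
      rw [chainLen_eq, hne]
      simp
    · rcases ns with _ | ⟨n1, ns⟩
      · -- exactly one successor
        obtain ⟨t0, hr0, hc0⟩ := hrc n0 (by rw [hne]; simp)
        refine ⟨n0 :: t0, ?_, ?_⟩
        · rw [fcr_one b n0 pool hne, hr0]
        · rw [chainLen_eq, hne]
          simp only [List.foldl_cons, List.foldl_nil]
          have hgt0 : (0 : Int) < chainLen n0 (pool.filter (fun x => x.1 != n0.1)) := by
            rw [hc0]
            have := Int.natCast_nonneg t0.length
            omega
          have eB : stepB pool (0, []) n0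
              = (chainLen n0 (pool.filter (fun x => x.1 != n0.1)), [n0.2.2]) := by
            simp [stepB, hgt0]
          rw [eB, hc0]
          push_cast [List.length_cons]
          ring
      · -- at least two successors: the doneList / candidates branch
        obtain ⟨t0, hr0, hc0⟩ := hrc n0 (by rw [hne]; simp)
        have hgt0 : (0 : Int) < chainLen n0 (pool.filter (fun x => x.1 != n0.1)) := by
          rw [hc0]
          have := Int.natCast_nonneg t0.length
          omega
        have hl0 : ((b :: findChain_right [n0] (pool.filter (fun x => x.1 != n0.1))).length : Int)
            = 1 + chainLen n0 (pool.filter (fun x => x.1 != n0.1)) := by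
          rw [hr0, hc0]
          push_cast [List.length_cons]
          ring
        rw [fcr_many b n0 n1 ns pool hne, chainLen_eq, hne]
        simp only [List.foldl_cons]
        have eA : stepA b pool ([], []) n0
            = ([n0.2.2], [b :: findChain_right [n0] (pool.filter (fun x => x.1 != n0.1))]) := by
          simp [stepA]
        have eB : stepB pool (0, []) n0
            = (chainLen n0 (pool.filter (fun x => x.1 != n0.1)), [n0.2.2]) := by
          simp [stepB, hgt0]
        rw [eA, eB]
        obtain ⟨g1, ⟨suf, g2⟩, g3, g4, g5, g6⟩ := foldInv b pool (n1 :: ns)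
          (fun m hm => hrc m (by rw [hne]; simp [hm]))
          [n0.2.2] [b :: findChain_right [n0] (pool.filter (fun x => x.1 != n0.1))]
          (chainLen n0 (pool.filter (fun x => x.1 != n0.1)))
          (by omega)
          (by intro cd hcd
              exact ⟨_, by simpa using hcd⟩)
          (by intro cd hcd
              have hcdeq : cd = b :: findChain_right [n0] (pool.filter (fun x => x.1 != n0.1)) := by
                simpa using hcd
              rw [hcdeq, hl0])
          (Or.inr ⟨b :: findChain_right [n0] (pool.filter (fun x => x.1 != n0.1)), by simp, hl0⟩)
        have hcne : ((n1 :: ns).foldl (stepA b pool)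
            ([n0.2.2], [b :: findChain_right [n0] (pool.filter (fun x => x.1 != n0.1))])).2 ≠ [] := by
          rw [g2]
          simp
        have hex : ∃ cd ∈ ((n1 :: ns).foldl (stepA b pool)
            ([n0.2.2], [b :: findChain_right [n0] (pool.filter (fun x => x.1 != n0.1))])).2,
            (cd.length : Int) = 1 + ((n1 :: ns).foldl (stepB pool)
              (chainLen n0 (pool.filter (fun x => x.1 != n0.1)), [n0.2.2])).1 := by
          rcases g6 with hx | hx
          · obtain ⟨cd, hcd⟩ := List.exists_mem_of_ne_nil _ hcne
            obtain ⟨tc, htc⟩ := g4 cd hcd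
            have h1c : (cd.length : Int) = (tc.length : Int) + 1 := by
              rw [htc]
              push_cast [List.length_cons]
              ring
            have h2c := g5 cd hcd
            have h3c := Int.natCast_nonneg tc.length
            exact ⟨cd, hcd, by omega⟩
          · exact hx
        obtain ⟨t, hsel, hlen⟩ := selectMax_spec b _ _ g5 hex g4
        exact ⟨t, hsel, hlen.symm⟩

-- driver equivalence
lemma driver_eq : ∀ (allBBLs : List (Int × (Int × Int))) (BBLsNum : Int),
    callfindChain allBBLs BBLsNum = callfindChain_alt allBBLs BBLsNum := by
  intro allBBLs
  induction allBBLs with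
  | nil => intro k; rfl
  | cons bhd rest ih =>
    intro k
    obtain ⟨t, hA, hC⟩ := main_len ((bhd :: rest).filter (fun x => x.1 != bhd.1)).length
      ((bhd :: rest).filter (fun x => x.1 != bhd.1)) le_rfl bhd
    simp only [callfindChain, callfindChain_alt]
    rw [hA, hC]
    simp only [List.headD_cons, List.length_cons]
    have hcast : ((t.length + 1 : Nat) : Int) = 1 + (t.length : Int) := by
      push_cast
      ring
    rw [hcast]
    by_cases hk : (1 + (t.length : Int)) = k
    · simp [hk]
    · simp [hk, ih]

-- ===== VERDICT (by name: the statement is the Claim_ definition above) =====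
theorem callfindChain_spec : Claim_equal_callfindChain := by
  intro allBBLs BBLsNum _
  unfold Spec_callfindChain
  exact driver_eq allBBLs BBLsNum
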